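-- pv_equiv track=rewrite | github.com/wooy0ng/PracticeCode | programmers/level1/이상한 문자 만들기/me.py | solution
-- ===== SOURCE A (Python) =====
-- def solution(s):
--     l = []
--     count = 0
--     for c in s:
--         if c not in ' ':
--             if count % 2:
--                 l.append(c.lower())
--             else:
--                 l.append(c.upper())
--             count += 1
--         else:
--             l.append(c)
--             count = 0
--     return "".join(l)
-- ===== SOURCE B (Python) =====
-- def solution(s):
--     words = s.split(' ')
--     out = []
--     for w in words:
--         out.append(''.join(c.upper() if i % 2 == 0 else c.lower() for i, c in enumerate(w)))
--     return ' '.join(out)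
-- ===== Notes on version B (the rewrite author's own statement) =====
-- stated objective: idiomatic
-- what changed: Replaces A's single flat pass with a manually reset parity counter by the idiomatic decomposition: split on single spaces, transform each word by index parity via enumerate, and join the words back with spaces.
import Mathlib
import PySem

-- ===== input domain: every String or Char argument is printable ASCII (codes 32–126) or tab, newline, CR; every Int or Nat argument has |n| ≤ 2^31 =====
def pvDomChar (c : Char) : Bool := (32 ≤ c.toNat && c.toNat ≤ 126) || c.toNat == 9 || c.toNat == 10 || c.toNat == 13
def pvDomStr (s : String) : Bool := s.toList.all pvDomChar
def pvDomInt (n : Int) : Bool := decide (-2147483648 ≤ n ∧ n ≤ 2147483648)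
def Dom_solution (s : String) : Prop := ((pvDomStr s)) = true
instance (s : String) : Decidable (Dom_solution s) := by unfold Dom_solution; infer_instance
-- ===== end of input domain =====

-- B replaces A's single flat pass with a resetting counter by the idiomatic
-- split(' ') / per-word enumerate / join(' ') decomposition; same return value.

-- ===== PORT A =====
-- one step of A's loop body on the state (l, count)
def solutionStep (st : List Char × Int) (c : Char) : List Char × Int :=
  if PySem.Chars.isIn [c] [' '] = false then
    (if PySem.Int.mod st.2 2 ≠ 0 then st.1 ++ [PySem.Chars.lowerChar c]
     else st.1 ++ [PySem.Chars.upperChar c],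
     st.2 + 1)
  else (st.1 ++ [c], 0)

def solution (s : String) : String :=
  String.mk (s.toList.foldl solutionStep ([], 0)).1

-- ===== PORT B =====
-- transformed word: even index upper, odd index lower (Source B's inner join over enumerate(w))
def solutionTw (w : List Char) : List Char :=
  (PySem.List.enumerate w 0).map
    (fun p => if PySem.Int.mod p.1 2 == 0 then PySem.Chars.upperChar p.2 else PySem.Chars.lowerChar p.2)

def solution_alt (s : String) : String :=
  String.mk (PySem.Chars.join [' '] ((PySem.Chars.splitOn s.toList [' ']).map solutionTw))

-- ===== PRECONDITION & SPEC =====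
def Spec_solution (s : String) (out : String) : Prop := out = solution_alt s
instance (s : String) (out : String) : Decidable (Spec_solution s out) := by unfold Spec_solution; infer_instance

-- ===== CLAIM (what is proved, stated in full; the proofs are below) =====
def Claim_equal_solution : Prop := ∀ (s : String), Dom_solution s → Spec_solution s (solution s)

-- ===== LEMMAS AND PROOFS =====

-- reference output of A's loop, reading the characters with the running counter
def solutionAux : List Char → Int → List Char
  | [], _ => []
  | c :: cs, k =>
    if c = ' ' then c :: solutionAux cs 0
    else (if PySem.Int.mod k 2 ≠ 0 then PySem.Chars.lowerChar c else PySem.Chars.upperChar c)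
           :: solutionAux cs (k + 1)

-- reference splitting on a single space (structural form of split(' '))
def solutionSplitRef : List Char → List (List Char)
  | [] => [[]]
  | c :: cs =>
    if c = ' ' then [] :: solutionSplitRef cs
    else
      match solutionSplitRef cs with
      | [] => [[c]]
      | w :: ws => (c :: w) :: ws

lemma solution_isIn_singleton (c : Char) :
    PySem.Chars.isIn [c] [' '] = (c == ' ') := by
  by_cases h : c = ' '
  · subst h; decide
  · simp only [beq_eq_false_iff_ne.mpr h]
    rw [PySem.Chars.isIn_eq_false_iff]
    intro hinf
    rcases hinf with ⟨p, q, hpq⟩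
    have : c ∈ p ++ [c] ++ q := by simp
    rw [hpq] at this
    simp at this
    exact h this

lemma solution_foldl_eq_aux (cs : List Char) :
    ∀ (l : List Char) (k : Int),
      (cs.foldl solutionStep (l, k)).1 = l ++ solutionAux cs k := by
  induction cs with
  | nil => intro l k; simp [solutionAux]
  | cons c cs ih =>
    intro l k
    by_cases h : c = ' '
    · subst h
      simp [List.foldl_cons, solutionStep, solution_isIn_singleton, solutionAux, ih]
    · simp [List.foldl_cons, solutionStep, solution_isIn_singleton,
        beq_eq_false_iff_ne.mpr h, solutionAux, h, ih]
      split <;> simp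

lemma solutionSplitRef_ne_nil (cs : List Char) : solutionSplitRef cs ≠ [] := by
  cases cs with
  | nil => simp [solutionSplitRef]
  | cons c cs =>
    simp only [solutionSplitRef]
    split
    · simp
    · cases solutionSplitRef cs <;> simp

lemma solution_go_eq (fuel : Nat) :
    ∀ (l cur : List Char) (acc : List (List Char)), l.length < fuel →
      PySem.Chars.splitOn.go [' '] fuel l cur acc
        = acc.reverse ++ (solutionSplitRef l).modifyHead (cur.reverse ++ ·) := by
  induction fuel with
  | zero => intro l cur acc h; exact absurd h (Nat.not_lt_zero _)
  | succ fuel ih =>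
    intro l cur acc h
    cases l with
    | nil =>
      simp [PySem.Chars.splitOn.go, solutionSplitRef]
    | cons c rest =>
      by_cases hc : c = ' '
      · subst hc
        have hp : ([' '] : List Char).isPrefixOf (' ' :: rest) = true := by simp [List.isPrefixOf]
        have hgo : PySem.Chars.splitOn.go [' '] (fuel + 1) (' ' :: rest) cur acc
            = PySem.Chars.splitOn.go [' '] fuel rest [] (cur.reverse :: acc) := by
          simp [PySem.Chars.splitOn.go, hp]
        rw [hgo, ih rest [] (cur.reverse :: acc) (by simpa using Nat.lt_of_succ_lt_succ h)]
        simp [solutionSplitRef]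
        cases hsr : solutionSplitRef rest with
        | nil => exact absurd hsr (solutionSplitRef_ne_nil rest)
        | cons w ws => simp
      · have hpre : ([' '] : List Char).isPrefixOf (c :: rest) = false := by
          simp [List.isPrefixOf]
          intro h'; exact hc h'.symm
        have hgo : PySem.Chars.splitOn.go [' '] (fuel + 1) (c :: rest) cur acc
            = PySem.Chars.splitOn.go [' '] fuel rest (c :: cur) acc := by
          simp [PySem.Chars.splitOn.go, hpre]
        rw [hgo, ih rest (c :: cur) acc (by simpa using Nat.lt_of_succ_lt_succ h)]
        simp only [solutionSplitRef, if_neg hc]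
        cases hsr : solutionSplitRef rest with
        | nil => exact absurd hsr (solutionSplitRef_ne_nil rest)
        | cons w ws => simp

lemma solution_splitOn_eq (cs : List Char) :
    PySem.Chars.splitOn cs [' '] = solutionSplitRef cs := by
  unfold PySem.Chars.splitOn
  rw [solution_go_eq (cs.length + 1) cs [] [] (by omega)]
  cases hsr : solutionSplitRef cs with
  | nil => exact absurd hsr (solutionSplitRef_ne_nil cs)
  | cons w ws => simp

-- what join [' '] contributes for the words after the first
def solutionJ (ws : List (List Char)) : List Char :=
  (ws.map (fun v => ' ' :: solutionTw v)).flatten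

lemma solution_join_cons (ws : List (List Char)) :
    ∀ (w : List Char),
      PySem.Chars.join [' '] (solutionTw w :: ws.map solutionTw) = solutionTw w ++ solutionJ ws := by
  induction ws with
  | nil => intro w; simp [PySem.Chars.join_singleton, solutionJ]
  | cons v ws ih =>
    intro w
    rw [List.map_cons, PySem.Chars.join_cons_cons, ih v]
    simp [solutionJ]

lemma solutionJ_cons (w : List Char) (ws : List (List Char)) :
    solutionJ (w :: ws) = ' ' :: (solutionTw w ++ solutionJ ws) := by
  simp [solutionJ]

lemma solution_main (cs : List Char) :
    ∀ (k : Int) (w : List Char) (ws : List (List Char)), solutionSplitRef cs = w :: ws →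
      (PySem.List.enumerate w k).map
          (fun p => if PySem.Int.mod p.1 2 == 0 then PySem.Chars.upperChar p.2 else PySem.Chars.lowerChar p.2)
        ++ solutionJ ws = solutionAux cs k := by
  induction cs with
  | nil =>
    intro k w ws h
    simp [solutionSplitRef] at h
    obtain ⟨hw, hws⟩ := h
    subst hw; subst hws
    simp [solutionAux, PySem.List.enumerate, solutionJ]
  | cons c cs ih =>
    intro k w ws h
    by_cases hc : c = ' '
    · subst hc
      simp [solutionSplitRef] at h
      obtain ⟨hw, hws⟩ := h
      subst hw; subst hws
      cases hsr : solutionSplitRef cs with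
      | nil => exact absurd hsr (solutionSplitRef_ne_nil cs)
      | cons w' ws' =>
        rw [PySem.List.enumerate_nil, List.map_nil, List.nil_append, solutionJ_cons,
          show solutionAux (' ' :: cs) k = ' ' :: solutionAux cs 0 from by simp [solutionAux],
          ← ih 0 w' ws' hsr]
        rfl
    · rw [show solutionSplitRef (c :: cs) = if c = ' ' then [] :: solutionSplitRef cs
            else match solutionSplitRef cs with
              | [] => [[c]]
              | w :: ws => (c :: w) :: ws from rfl, if_neg hc] at h
      cases hsr : solutionSplitRef cs with
      | nil => exact absurd hsr (solutionSplitRef_ne_nil cs)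
      | cons w' ws' =>
        rw [hsr] at h
        obtain ⟨hw, hws⟩ := List.cons.inj h
        subst hws
        rw [← hw]
        rw [PySem.List.enumerate_cons]
        simp only [List.map_cons, List.cons_append]
        rw [ih (k + 1) w' ws' hsr]
        simp only [solutionAux, if_neg hc]
        congr 1
        rcases Int.emod_two_eq k with hm | hm <;>
          simp [hm]

-- ===== VERDICT (by name: the statement is the Claim_ definition above) =====
theorem solution_spec : Claim_equal_solution := by
  intro s _
  unfold Spec_solution solution solution_alt
  rw [solution_foldl_eq_aux s.toList [] 0, List.nil_append,
    solution_splitOn_eq]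
  cases hsr : solutionSplitRef s.toList with
  | nil => exact absurd hsr (solutionSplitRef_ne_nil s.toList)
  | cons w ws =>
    rw [List.map_cons, solution_join_cons]
    rw [show solutionTw w = (PySem.List.enumerate w 0).map
      (fun p => if PySem.Int.mod p.1 2 == 0 then PySem.Chars.upperChar p.2 else PySem.Chars.lowerChar p.2) from rfl]
    rw [solution_main s.toList 0 w ws hsr]
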